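-- pv_equiv track=rewrite | github.com/araschermer/python-code | algorithms_and_data_structures/arrays/minimum_reward.py | calculate_rewards
-- ===== SOURCE A (Python) =====
-- def calculate_rewards(grades: [float]):
--     """given a list of grades represented by positive integers
--     returns rewards number that suits the students grades in the same given
--     orders """
--     # Runtime: O(n), space: O(n)
--     # initializing the rewards with minimum of 1 for each grade
--     rewards = [1 for _ in grades]
--     # iterating forwards
--     for index in range(1, len(grades)):
--         # if the current grade greater than the previous grade:
--         #  increase the corresponding reward by 1
--         if grades[index] > grades[index - 1]:
--             rewards[index] = 1 + rewards[index - 1]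
--         # if duplicates exist :
--         # same rewards  for the same  grades
--         elif grades[index] == grades[index - 1]:
--             rewards[index] = rewards[index - 1]
--         else:
--             #  if the current grade is smaller then the previous grade:
--             # reward for current grade=1
--             continue
--     # iterating backwards: handle the reward corresponding to grades in descending order
--     for index in range(len(grades) - 2, -1, -1):
--         # if the current grade is greater following grade
--         if grades[index] > grades[index + 1]:
--             #  the rewards  numbers is the maximum between the current assignment
--             # and the reward of the following grade +1
--             rewards[index] = max(rewards[index + 1] + 1, rewards[index])
--         elif grades[index] <= grades[index + 1]:
--             # otherwise, continue, these cases have been handled in the previous for loop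
--             continue
--
--     return rewards
-- ===== SOURCE B (Python) =====
-- def calculate_rewards(grades: [float]):
--     """Single pass over maximal strictly-descending runs: each run of length m
--     emits max(head, m), m-1, ..., 1, where head is the forward increasing-run
--     value carried across run boundaries (+1 on a rise, copied on a plateau)."""
--     result = []
--     prev_l = None  # forward-run value of the element just before position i
--     i = 0
--     n = len(grades)
--     while i < n:
--         # maximal strictly-descending run grades[i..j-1]
--         j = i + 1
--         while j < n and grades[j - 1] > grades[j]:
--             j += 1
--         m = j - i
--         if prev_l is None:
--             head = 1
--         elif grades[i] > grades[i - 1]: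
--             head = prev_l + 1
--         else:  # run boundary: grades[i-1] <= grades[i], so equal here
--             head = prev_l
--         result.append(max(head, m))
--         result.extend(range(m - 1, 0, -1))
--         prev_l = head if m == 1 else 1
--         i = j
--     return result
-- ===== Notes on version B (the rewrite author's own statement) =====
-- stated objective: alternative
-- what changed: A makes two index passes mutating a rewards array (forward increments, backward max-fixup); B makes a single pass that segments the grades into maximal strictly-descending runs and emits each run's rewards arithmetically from the run length (max(head,m), m-1, ..., 1), carrying only the forward-run value across run boundaries.
import Mathlib
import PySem

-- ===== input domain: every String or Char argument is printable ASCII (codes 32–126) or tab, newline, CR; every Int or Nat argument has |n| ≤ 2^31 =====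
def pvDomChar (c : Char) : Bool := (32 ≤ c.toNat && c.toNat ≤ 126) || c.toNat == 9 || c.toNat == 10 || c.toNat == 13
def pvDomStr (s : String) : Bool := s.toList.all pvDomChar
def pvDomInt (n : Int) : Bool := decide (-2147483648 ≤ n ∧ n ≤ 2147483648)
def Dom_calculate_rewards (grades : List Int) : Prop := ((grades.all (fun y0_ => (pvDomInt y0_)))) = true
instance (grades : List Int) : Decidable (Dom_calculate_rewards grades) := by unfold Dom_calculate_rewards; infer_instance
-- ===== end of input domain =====

-- B replaces A's two index passes over a mutable rewards array with a single pass that splits the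
-- grades into maximal strictly-descending runs and emits each run's rewards arithmetically from the
-- run length (objective: alternative).

-- ===== PORT A =====
-- A's body of the forward loop: updates rewards[index] from grades[index], grades[index-1].
-- All list indices in A are provably in range, so plain `getD _ 0` is exact here.
def pvFwdStep (grades : List Int) (rw : List Int) (i : Nat) : List Int :=
  if grades.getD i 0 > grades.getD (i - 1) 0 then rw.set i (1 + rw.getD (i - 1) 0)
  else if grades.getD i 0 = grades.getD (i - 1) 0 then rw.set i (rw.getD (i - 1) 0)
  else rw

-- A's body of the backward loop.
def pvBwdStep (grades : List Int) (rw : List Int) (i : Nat) : List Int :=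
  if grades.getD i 0 > grades.getD (i + 1) 0 then
    rw.set i (max (rw.getD (i + 1) 0 + 1) (rw.getD i 0))
  else rw

-- range(1, n) is ported as List.range' 1 (n-1); range(n-2, -1, -1) as (List.range (n-1)).reverse
-- (the same Nat index sequences; every index Python visits is nonnegative here).
def calculate_rewards (grades : List Int) : List Int :=
  let n := grades.length
  let rewards := List.replicate n (1 : Int)
  let rewards := (List.range' 1 (n - 1)).foldl (pvFwdStep grades) rewards
  ((List.range (n - 1)).reverse).foldl (pvBwdStep grades) rewards

-- ===== PORT B =====
-- Source B's inner while loop: given grades[i] and the tail, returns (m, grades[j-1], grades[j:]),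
-- the length of the maximal strictly-descending run, its last grade, and the remaining grades.
def pvDescRun : Int → List Int → Nat × Int × List Int
  | g, [] => (1, g, [])
  | g, h :: t =>
    if g > h then
      ((pvDescRun h t).1 + 1, (pvDescRun h t).2.1, (pvDescRun h t).2.2)
    else (1, g, h :: t)

-- cited by pvLoop's decreasing_by
theorem pvDescRun_rest_le : ∀ (t : List Int) (g : Int), (pvDescRun g t).2.2.length ≤ t.length := by
  intro t
  induction t with
  | nil => intro g; simp [pvDescRun]
  | cons h t ih =>
    intro g
    by_cases hgh : g > h
    · simp only [pvDescRun, if_pos hgh]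
      exact le_trans (ih h) (by simp)
    · simp [pvDescRun, if_neg hgh]

-- Source B's outer while loop; prev = None / (grades[i-1], prev_l); emits one run per step.
-- result.extend(range(m-1, 0, -1)) is ported with PySem.List.pyRange.
def pvLoop : Option (Int × Int) → List Int → List Int
  | _, [] => []
  | prev, g :: t =>
    let r := pvDescRun g t
    let head : Int :=
      match prev with
      | none => 1
      | some (pg, pl) => if g > pg then pl + 1 else pl
    max head (r.1 : Int) ::
      (PySem.List.pyRange ((r.1 : Int) - 1) 0 (-1) ++
        pvLoop (some (r.2.1, if r.1 = 1 then head else 1)) r.2.2)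
termination_by _ l => l.length
decreasing_by exact Nat.lt_succ_of_le (pvDescRun_rest_le t g)

def calculate_rewards_alt (grades : List Int) : List Int := pvLoop none grades

-- ===== PRECONDITION & SPEC =====
def Spec_calculate_rewards (grades : List Int) (out : List Int) : Prop := out = calculate_rewards_alt grades
instance (grades : List Int) (out : List Int) : Decidable (Spec_calculate_rewards grades out) := by unfold Spec_calculate_rewards; infer_instance

-- ===== CLAIM (what is proved, stated in full; the proofs are below) =====
def Claim_equal_calculate_rewards : Prop := ∀ (grades : List Int), Dom_calculate_rewards grades → Spec_calculate_rewards grades (calculate_rewards grades)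

-- ===== LEMMAS AND PROOFS =====

-- Reference characterization: forward increasing-run values (equal copies) …
def pvUp : Int → Int → List Int → List Int
  | _, _, [] => []
  | p, lv, g :: rest =>
    let v := if g > p then lv + 1 else if g = p then lv else 1
    v :: pvUp g v rest

def pvUpFull : List Int → List Int
  | [] => []
  | g :: rest => 1 :: pvUp g 1 rest

-- … and backward strictly-descending run lengths, combined by elementwise max.
def pvDown : List Int → List Int
  | [] => []
  | [_] => [1]
  | g :: g' :: rest =>
    let d := pvDown (g' :: rest)
    (if g > g' then d.headD 0 + 1 else 1) :: d

def pvRef (grades : List Int) : List Int :=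
  List.zipWith max (pvUpFull grades) (pvDown grades)

theorem pvUp_length (xs : List Int) : ∀ (p lv : Int), (pvUp p lv xs).length = xs.length := by
  induction xs with
  | nil => intro p lv; rfl
  | cons x rest ih => intro p lv; simp [pvUp, ih]

theorem pvUpFull_length (g : List Int) : (pvUpFull g).length = g.length := by
  cases g with
  | nil => rfl
  | cons a rest => simp [pvUpFull, pvUp_length]

theorem pvDown_length (g : List Int) : (pvDown g).length = g.length := by
  induction g with
  | nil => rfl
  | cons a rest ih =>
    cases rest with
    | nil => rfl
    | cons b rest' => simp [pvDown] at ih ⊢; omega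

theorem pvUp_pos (xs : List Int) : ∀ (p lv : Int), 1 ≤ lv → ∀ x ∈ pvUp p lv xs, 1 ≤ x := by
  induction xs with
  | nil => intro p lv _ x hx; simp [pvUp] at hx
  | cons y rest ih =>
    intro p lv hlv x hx
    simp only [pvUp, List.mem_cons] at hx
    rcases hx with h | h
    · subst h; split_ifs <;> omega
    · exact ih y _ (by split_ifs <;> omega) x h

theorem pvUpFull_pos (g : List Int) : ∀ x ∈ pvUpFull g, 1 ≤ x := by
  cases g with
  | nil => intro x hx; simp [pvUpFull] at hx
  | cons a rest =>
    intro x hx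
    simp only [pvUpFull, List.mem_cons] at hx
    rcases hx with h | h
    · omega
    · exact pvUp_pos rest a 1 (le_refl 1) x h

theorem pvDown_pos (g : List Int) : ∀ x ∈ pvDown g, 1 ≤ x := by
  induction g with
  | nil => intro x hx; simp [pvDown] at hx
  | cons a rest ih =>
    cases rest with
    | nil => intro x hx; simp [pvDown] at hx; omega
    | cons b rest' =>
      intro x hx
      simp only [pvDown, List.mem_cons] at hx
      rcases hx with h | h
      · subst h
        have hb : 1 ≤ (pvDown (b :: rest')).headD 0 := by
          have : (pvDown (b :: rest')).length = (b :: rest').length := pvDown_length _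
          cases hd : pvDown (b :: rest') with
          | nil => rw [hd] at this; simp at this
          | cons y ys => exact ih y (by rw [hd]; exact List.mem_cons_self)
        split_ifs <;> omega
      · exact ih x h

theorem pvUp_rec (xs : List Int) : ∀ (p lv : Int) (i : Nat), i + 1 < xs.length →
    (pvUp p lv xs).getD (i+1) 0 =
      (if xs.getD (i+1) 0 > xs.getD i 0 then (pvUp p lv xs).getD i 0 + 1
       else if xs.getD (i+1) 0 = xs.getD i 0 then (pvUp p lv xs).getD i 0 else 1) := by
  induction xs with
  | nil => intro p lv i h; simp at h
  | cons x rest ih =>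
    intro p lv i h
    cases i with
    | zero =>
      cases rest with
      | nil => simp at h
      | cons y rest' => simp [pvUp]
    | succ j =>
      have h' : j + 1 < rest.length := by simp at h; omega
      simpa [pvUp, List.getD_cons_succ] using
        ih x (if x > p then lv + 1 else if x = p then lv else 1) j h'

theorem pvUpFull_rec (g : List Int) (i : Nat) (h : i + 1 < g.length) :
    (pvUpFull g).getD (i+1) 0 =
      (if g.getD (i+1) 0 > g.getD i 0 then (pvUpFull g).getD i 0 + 1
       else if g.getD (i+1) 0 = g.getD i 0 then (pvUpFull g).getD i 0 else 1) := by
  cases g with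
  | nil => simp at h
  | cons a rest =>
    cases i with
    | zero =>
      cases rest with
      | nil => simp at h
      | cons b rest' => simp [pvUpFull, pvUp]
    | succ j =>
      have h' : j + 1 < rest.length := by simp at h; omega
      simpa [pvUpFull, List.getD_cons_succ] using pvUp_rec rest a 1 j h'

theorem pvDown_rec (g : List Int) : ∀ (i : Nat), i + 1 < g.length →
    (pvDown g).getD i 0 =
      (if g.getD i 0 > g.getD (i+1) 0 then (pvDown g).getD (i+1) 0 + 1 else 1) := by
  induction g with
  | nil => intro i h; simp at h
  | cons a rest ih =>
    intro i h
    cases rest with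
    | nil => simp at h
    | cons b rest' =>
      cases i with
      | zero =>
        have hne : (pvDown (b :: rest')) ≠ [] := by
          have := pvDown_length (b :: rest'); intro he; rw [he] at this; simp at this
        cases hd : pvDown (b :: rest') with
        | nil => exact absurd hd hne
        | cons y ys => simp [pvDown, hd]
      | succ j =>
        have h' : j + 1 < (b :: rest').length := by simp at h ⊢; omega
        simpa [pvDown, List.getD_cons_succ] using ih j h'

theorem pvDown_last (g : List Int) (h : g ≠ []) : (pvDown g).getD (g.length - 1) 0 = 1 := by
  induction g with
  | nil => exact absurd rfl h
  | cons a rest ih =>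
    cases rest with
    | nil => rfl
    | cons b rest' =>
      have := ih (by simp)
      simpa [pvDown, List.getD_cons_succ] using this

theorem ref_length (g : List Int) : (pvRef g).length = g.length := by
  simp [pvRef, pvUpFull_length, pvDown_length]

theorem ref_getD (g : List Int) (i : Nat) (h : i < g.length) :
    (pvRef g).getD i 0 =
      max ((pvUpFull g).getD i 0) ((pvDown g).getD i 0) := by
  have h1 : i < (pvUpFull g).length := by rw [pvUpFull_length]; exact h
  have h2 : i < (pvDown g).length := by rw [pvDown_length]; exact h
  have h3 : i < (pvRef g).length := by rw [ref_length]; exact h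
  rw [List.getD_eq_getElem _ _ h3, List.getD_eq_getElem _ _ h1, List.getD_eq_getElem _ _ h2]
  simp [pvRef]

theorem up_getD_pos (g : List Int) (i : Nat) (h : i < g.length) :
    1 ≤ (pvUpFull g).getD i 0 := by
  have h1 : i < (pvUpFull g).length := by rw [pvUpFull_length]; exact h
  rw [List.getD_eq_getElem _ _ h1]
  exact pvUpFull_pos g _ (List.getElem_mem h1)

theorem down_getD_pos (g : List Int) (i : Nat) (h : i < g.length) :
    1 ≤ (pvDown g).getD i 0 := by
  have h1 : i < (pvDown g).length := by rw [pvDown_length]; exact h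
  rw [List.getD_eq_getElem _ _ h1]
  exact pvDown_pos g _ (List.getElem_mem h1)

theorem getD_take (l : List Int) (a i : Nat) (hi : i < a) (ha : a ≤ l.length) :
    (l.take a).getD i 0 = l.getD i 0 := by
  have h1 : i < (l.take a).length := by simp; omega
  have h2 : i < l.length := by omega
  rw [List.getD_eq_getElem _ _ h1, List.getD_eq_getElem _ _ h2, List.getElem_take]

theorem take_succ_getD (l : List Int) (a : Nat) (h : a < l.length) :
    l.take (a+1) = l.take a ++ [l.getD a 0] := by
  rw [List.take_add_one, List.getElem?_eq_getElem h, List.getD_eq_getElem _ _ h]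
  rfl

theorem drop_cons_getD (l : List Int) (a : Nat) (h : a < l.length) :
    l.drop a = l.getD a 0 :: l.drop (a+1) := by
  rw [List.getD_eq_getElem _ _ h]
  exact List.drop_eq_getElem_cons h

theorem fwd_inv (g : List Int) : ∀ (k a : Nat), 1 ≤ a → a + k = g.length →
    (List.range' a k).foldl (pvFwdStep g)
      ((pvUpFull g).take a ++ List.replicate (g.length - a) 1) = pvUpFull g := by
  intro k
  induction k with
  | zero =>
    intro a _ hak
    simp only [Nat.add_zero] at hak
    subst hak
    simp [List.take_of_length_le (le_of_eq (pvUpFull_length g))]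
  | succ k ih =>
    intro a ha hak
    have haL : a < g.length := by omega
    have haU : a < (pvUpFull g).length := by rw [pvUpFull_length]; exact haL
    have htl : ((pvUpFull g).take a).length = a := by simp [pvUpFull_length]; omega
    rw [List.range'_succ, List.foldl_cons]
    have hrep : List.replicate (g.length - a) (1:Int)
        = 1 :: List.replicate (g.length - (a+1)) 1 := by
      have : g.length - a = (g.length - (a+1)) + 1 := by omega
      rw [this, List.replicate_succ]
    have hgd1 : (((pvUpFull g).take a) ++ List.replicate (g.length - a) (1:Int)).getD (a-1) 0
        = (pvUpFull g).getD (a-1) 0 := by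
      rw [List.getD_append _ _ _ _ (by omega), getD_take _ _ _ (by omega) (by rw [pvUpFull_length]; omega)]
    have hrec := pvUpFull_rec g (a-1) (by omega)
    have ha1 : a - 1 + 1 = a := by omega
    rw [ha1] at hrec
    have hset : ∀ v : Int,
        (((pvUpFull g).take a) ++ List.replicate (g.length - a) (1:Int)).set a v
        = ((pvUpFull g).take a) ++ v :: List.replicate (g.length - (a+1)) 1 := by
      intro v
      rw [hrep, List.set_append_right _ _ (le_of_eq htl), htl]
      simp
    have hstep : pvFwdStep g (((pvUpFull g).take a) ++ List.replicate (g.length - a) 1) a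
        = ((pvUpFull g).take (a+1)) ++ List.replicate (g.length - (a+1)) 1 := by
      unfold pvFwdStep
      rw [hgd1, take_succ_getD _ _ haU, List.append_assoc, List.cons_append, List.nil_append]
      by_cases h1 : g.getD a 0 > g.getD (a-1) 0
      · rw [if_pos h1, hset, hrec, if_pos h1]
        have : (1:Int) + (pvUpFull g).getD (a-1) 0 = (pvUpFull g).getD (a-1) 0 + 1 := by ring
        rw [this]
      · rw [if_neg h1]
        by_cases h2 : g.getD a 0 = g.getD (a-1) 0
        · rw [if_pos h2, hset, hrec, if_neg h1, if_pos h2]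
        · rw [if_neg h2, hrec, if_neg h1, if_neg h2, hrep]
    rw [hstep]
    exact ih (a+1) (by omega) (by omega)

theorem bwd_inv (g : List Int) : ∀ (k j : Nat), j + k = g.length - 1 →
    ((List.range' j k).reverse).foldl (pvBwdStep g) (pvUpFull g)
      = (pvUpFull g).take j ++ (pvRef g).drop j := by
  intro k
  induction k with
  | zero =>
    intro j hj
    simp only [Nat.add_zero] at hj
    cases g with
    | nil =>
      simp [pvUpFull, pvRef, pvDown]
    | cons a rest =>
      subst hj
      set g := a :: rest with hg
      have hlen : g.length - 1 < g.length := by simp [hg]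
      have hL : (pvUpFull g).drop (g.length - 1) = [(pvUpFull g).getD (g.length - 1) 0] := by
        rw [drop_cons_getD _ _ (by rw [pvUpFull_length]; exact hlen)]
        rw [List.drop_eq_nil_of_le (by rw [pvUpFull_length]; simp [hg])]
      have hR : (pvRef g).drop (g.length - 1)
          = [(pvRef g).getD (g.length - 1) 0] := by
        rw [drop_cons_getD _ _ (by rw [ref_length]; exact hlen)]
        rw [List.drop_eq_nil_of_le (by rw [ref_length]; simp [hg])]
      have hval : (pvRef g).getD (g.length - 1) 0
          = (pvUpFull g).getD (g.length - 1) 0 := by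
        rw [ref_getD _ _ hlen, pvDown_last g (by simp [hg])]
        have := up_getD_pos g _ hlen
        omega
      simp only [List.range'_zero, List.reverse_nil, List.foldl_nil]
      rw [hR, hval, ← hL, List.take_append_drop]
  | succ k ih =>
    intro j hj
    have hlen2 : j + k + 2 ≤ g.length := by omega
    have hj1 : j + 1 < g.length := by omega
    have hjL : j < (pvUpFull g).length := by rw [pvUpFull_length]; omega
    have htl : ((pvUpFull g).take (j+1)).length = j + 1 := by simp [pvUpFull_length]; omega
    rw [List.range'_succ, List.reverse_cons, List.foldl_append, List.foldl_cons, List.foldl_nil,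
      ih (j+1) (by omega)]
    have hgdj : (((pvUpFull g).take (j+1)) ++ (pvRef g).drop (j+1)).getD j 0
        = (pvUpFull g).getD j 0 := by
      rw [List.getD_append _ _ _ _ (by omega), getD_take _ _ _ (by omega) (by rw [pvUpFull_length]; omega)]
    have hgdj1 : (((pvUpFull g).take (j+1)) ++ (pvRef g).drop (j+1)).getD (j+1) 0
        = (pvRef g).getD (j+1) 0 := by
      rw [List.getD_append_right _ _ _ _ (le_of_eq htl), htl, Nat.sub_self]
      rw [drop_cons_getD _ _ (by rw [ref_length]; omega)]
      simp
    have hset : ∀ v : Int,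
        ((((pvUpFull g).take (j+1)) ++ (pvRef g).drop (j+1)).set j v)
        = ((pvUpFull g).take j) ++ v :: (pvRef g).drop (j+1) := by
      intro v
      rw [List.set_append_left _ _ (by omega), take_succ_getD _ _ hjL]
      have hl : ((pvUpFull g).take j).length = j := by simp [pvUpFull_length]; omega
      rw [List.set_append_right _ _ (le_of_eq hl), hl, Nat.sub_self]
      simp
    have hgoal : (pvUpFull g).take j ++ (pvRef g).drop j
        = (pvUpFull g).take j ++ (pvRef g).getD j 0 :: (pvRef g).drop (j+1) := by
      rw [drop_cons_getD _ _ (by rw [ref_length]; omega)]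
    have hDrec := pvDown_rec g j (by omega)
    have hRj := ref_getD g j (by omega)
    have hRj1 := ref_getD g (j+1) (by omega)
    have hLpos := up_getD_pos g j (by omega)
    have hDpos := down_getD_pos g (j+1) (by omega)
    unfold pvBwdStep
    rw [hgdj, hgdj1, hgoal]
    by_cases h1 : g.getD j 0 > g.getD (j+1) 0
    · rw [if_pos h1, hset]
      have hL1 : (pvUpFull g).getD (j+1) 0 = 1 := by
        rw [pvUpFull_rec g j (by omega), if_neg (by omega), if_neg (by omega)]
      rw [if_pos h1] at hDrec
      rw [hL1] at hRj1
      congr 1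
      rw [hRj, hRj1, hDrec]
      congr 1
      omega
    · rw [if_neg h1]
      rw [if_neg h1] at hDrec
      rw [take_succ_getD _ _ hjL, List.append_assoc, List.cons_append, List.nil_append]
      congr 1
      rw [hRj, hDrec]
      congr 1
      omega

theorem pv_calc_eq_ref : ∀ (grades : List Int),
    calculate_rewards grades = pvRef grades := by
  intro g
  cases g with
  | nil => rfl
  | cons a rest =>
    unfold calculate_rewards
    have hlen : 1 ≤ (a :: rest).length := by simp
    have hinit : List.replicate ((a :: rest).length) (1:Int)
        = (pvUpFull (a :: rest)).take 1 ++ List.replicate ((a :: rest).length - 1) 1 := by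
      have h1 : (pvUpFull (a :: rest)).take 1 = [1] := by simp [pvUpFull]
      rw [h1]
      have : (a :: rest).length = ((a :: rest).length - 1) + 1 := by omega
      rw [this, List.replicate_succ]
      simp
    simp only []
    rw [hinit, fwd_inv (a :: rest) ((a :: rest).length - 1) 1 (le_refl 1) (by omega),
      List.range_eq_range', bwd_inv (a :: rest) ((a :: rest).length - 1) 0 (by omega)]
    simp

-- ===== lemmas for B = pvRef =====

-- [k, k-1, …, 1] as a plain recursive list
def pvEmit : Nat → List Int
  | 0 => []
  | k + 1 => ((k : Int) + 1) :: pvEmit k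

theorem pvEmit_length (k : Nat) : (pvEmit k).length = k := by
  induction k with
  | zero => rfl
  | succ k ih => simp [pvEmit, ih]

theorem pyRange_emit (k : Nat) : PySem.List.pyRange (k : Int) 0 (-1) = pvEmit k := by
  induction k with
  | zero => simp [pvEmit, PySem.List.pyRange_neg_one_eq_nil (a := 0) (b := 0) (by omega)]
  | succ k ih =>
    rw [PySem.List.pyRange_neg_one_cons (by omega)]
    have : ((k : Int) + 1) - 1 = (k : Int) := by ring
    push_cast
    rw [this, ih]
    simp [pvEmit]

theorem zip_rep_emit (k : Nat) :
    List.zipWith max (List.replicate k (1:Int)) (pvEmit k) = pvEmit k := by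
  induction k with
  | zero => rfl
  | succ k ih =>
    simp only [List.replicate_succ, pvEmit, List.zipWith_cons_cons, ih]
    congr 1
    omega

theorem pvDescRun_pos : ∀ (t : List Int) (g : Int), 1 ≤ (pvDescRun g t).1 := by
  intro t
  induction t with
  | nil => intro g; simp [pvDescRun]
  | cons h t ih =>
    intro g
    by_cases hgh : g > h
    · simp only [pvDescRun, if_pos hgh]; omega
    · simp [pvDescRun, if_neg hgh]

theorem pvDescRun_boundary : ∀ (t : List Int) (g r : Int) (rs : List Int),
    (pvDescRun g t).2.2 = r :: rs → (pvDescRun g t).2.1 ≤ r := by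
  intro t
  induction t with
  | nil => intro g r rs h; simp [pvDescRun] at h
  | cons h t ih =>
    intro g r rs hrest
    by_cases hgh : g > h
    · simp only [pvDescRun, if_pos hgh] at hrest ⊢
      exact ih h r rs hrest
    · simp only [pvDescRun, if_neg hgh] at hrest ⊢
      obtain ⟨hr, _⟩ := List.cons.injEq .. ▸ hrest
      omega

theorem run_down : ∀ (t : List Int) (g : Int),
    pvDown (g :: t) = pvEmit (pvDescRun g t).1 ++ pvDown (pvDescRun g t).2.2 := by
  intro t
  induction t with
  | nil => intro g; simp [pvDown, pvDescRun, pvEmit]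
  | cons h t ih =>
    intro g
    by_cases hgh : g > h
    · have hih := ih h
      obtain ⟨k, hk⟩ : ∃ k, (pvDescRun h t).1 = k + 1 :=
        ⟨(pvDescRun h t).1 - 1, by have := pvDescRun_pos t h; omega⟩
      have hhead : (pvDown (h :: t)).headD 0 = ((pvDescRun h t).1 : Int) := by
        rw [hih, hk]
        simp [pvEmit]
      simp only [pvDown, pvDescRun, if_pos hgh]
      rw [hhead, hih, hk]
      simp [pvEmit]
    · simp [pvDown, pvDescRun, if_neg hgh, pvEmit]

theorem run_up : ∀ (t : List Int) (g v : Int),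
    pvUp g v t = List.replicate ((pvDescRun g t).1 - 1) 1 ++
      pvUp (pvDescRun g t).2.1 (if (pvDescRun g t).1 = 1 then v else 1) (pvDescRun g t).2.2 := by
  intro t
  induction t with
  | nil => intro g v; simp [pvUp, pvDescRun]
  | cons h t ih =>
    intro g v
    by_cases hgh : g > h
    · have hv : (if h > g then v + 1 else if h = g then v else 1) = 1 := by
        rw [if_neg (by omega), if_neg (by omega)]
      have hm := pvDescRun_pos t h
      simp only [pvUp, pvDescRun, if_pos hgh, hv]
      rw [ih h 1]
      have h1 : (pvDescRun h t).1 + 1 - 1 = ((pvDescRun h t).1 - 1) + 1 := by omega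
      have h2 : (pvDescRun h t).1 + 1 ≠ 1 := by omega
      rw [h1, if_neg h2, List.replicate_succ]
      by_cases h3 : (pvDescRun h t).1 = 1
      · simp [h3]
      · simp [h3]
    · simp [pvUp, pvDescRun, if_neg hgh]

-- heads of the reference tables over one run
theorem loop_eq : ∀ (n : Nat) (t : List Int) (g pg pl : Int), t.length ≤ n →
    pg ≤ g → 1 ≤ pl →
    pvLoop (some (pg, pl)) (g :: t) =
      List.zipWith max (pvUp pg pl (g :: t)) (pvDown (g :: t)) := by
  intro n
  induction n with
  | zero =>
    intro t g pg pl hn hpg hpl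
    have ht : t = [] := List.eq_nil_of_length_eq_zero (Nat.le_zero.mp hn)
    subst ht
    have hv : (if g > pg then pl + 1 else if g = pg then pl else 1)
        = (if g > pg then pl + 1 else pl) := by
      by_cases h : g > pg
      · simp [h]
      · rw [if_neg h, if_neg h, if_pos (by omega)]
    rw [pvLoop]
    simp only [pvDescRun, pvUp, pvDown, pvLoop, Nat.cast_one]
    rw [hv, PySem.List.pyRange_neg_one_eq_nil (by omega : (1:Int) - 1 ≤ 0)]
    simp
  | succ n ih =>
    intro t g pg pl hn hpg hpl
    obtain ⟨k, hk⟩ : ∃ k, (pvDescRun g t).1 = k + 1 :=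
      ⟨(pvDescRun g t).1 - 1, by have := pvDescRun_pos t g; omega⟩
    have harg : (if g > pg then pl + 1 else if g = pg then pl else 1)
        = (if g > pg then pl + 1 else pl) := by
      by_cases h : g > pg
      · simp [h]
      · rw [if_neg h, if_neg h, if_pos (by omega)]
    have hup : pvUp pg pl (g :: t)
        = (if g > pg then pl + 1 else pl) :: pvUp g (if g > pg then pl + 1 else pl) t := by
      simp only [pvUp]
      rw [harg]
    rw [pvLoop]
    rw [hup, run_down t g, run_up t g (if g > pg then pl + 1 else pl), hk]
    simp only [pvEmit, Nat.add_sub_cancel]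
    have hpy : PySem.List.pyRange (((k+1 : Nat) : Int) - 1) 0 (-1) = pvEmit k := by
      have hc : (((k+1 : Nat) : Int) - 1) = (k : Int) := by push_cast; ring
      rw [hc, pyRange_emit]
    rw [hpy]
    have htail : pvLoop (some ((pvDescRun g t).2.1,
          if k + 1 = 1 then (if g > pg then pl + 1 else pl) else 1)) (pvDescRun g t).2.2
        = List.zipWith max
            (pvUp (pvDescRun g t).2.1
              (if k + 1 = 1 then (if g > pg then pl + 1 else pl) else 1) (pvDescRun g t).2.2)
            (pvDown (pvDescRun g t).2.2) := by
      cases hrest : (pvDescRun g t).2.2 with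
      | nil => rw [pvLoop]; simp [pvUp, pvDown]
      | cons q qs =>
        have hql : qs.length ≤ n := by
          have h1 := pvDescRun_rest_le t g
          rw [hrest] at h1; simp at h1; omega
        exact ih qs q _ _ hql (pvDescRun_boundary t g q qs hrest) (by split_ifs <;> omega)
    rw [htail, List.cons_append, List.zipWith_cons_cons,
      List.zipWith_append (h := by simp [pvEmit_length]), zip_rep_emit]
    push_cast
    ring_nf

theorem pv_alt_eq_ref : ∀ (grades : List Int),
    calculate_rewards_alt grades = pvRef grades := by
  intro g
  cases g with
  | nil => rw [calculate_rewards_alt, pvLoop]; rfl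
  | cons a t =>
    -- mirror one step of pvLoop with prev = none (head value 1), then use loop_eq for the rest
    unfold calculate_rewards_alt pvRef
    obtain ⟨k, hk⟩ : ∃ k, (pvDescRun a t).1 = k + 1 :=
      ⟨(pvDescRun a t).1 - 1, by have := pvDescRun_pos t a; omega⟩
    have hupfull : pvUpFull (a :: t) = 1 :: pvUp a 1 t := rfl
    rw [pvLoop]
    rw [hupfull, run_down t a, run_up t a 1, hk]
    simp only [pvEmit, Nat.add_sub_cancel]
    have hpy : PySem.List.pyRange (((k+1 : Nat) : Int) - 1) 0 (-1) = pvEmit k := by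
      have hc : (((k+1 : Nat) : Int) - 1) = (k : Int) := by push_cast; ring
      rw [hc, pyRange_emit]
    rw [hpy]
    have htail : pvLoop (some ((pvDescRun a t).2.1,
          if k + 1 = 1 then (1 : Int) else 1)) (pvDescRun a t).2.2
        = List.zipWith max
            (pvUp (pvDescRun a t).2.1
              (if k + 1 = 1 then (1 : Int) else 1) (pvDescRun a t).2.2)
            (pvDown (pvDescRun a t).2.2) := by
      cases hrest : (pvDescRun a t).2.2 with
      | nil => rw [pvLoop]; simp [pvUp, pvDown]
      | cons q qs =>
        exact loop_eq qs.length qs q _ _ (le_refl _)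
          (pvDescRun_boundary t a q qs hrest) (by split_ifs <;> omega)
    rw [htail, List.cons_append, List.zipWith_cons_cons,
      List.zipWith_append (h := by simp [pvEmit_length]), zip_rep_emit]
    push_cast
    ring_nf

-- ===== VERDICT (by name: the statement is the Claim_ definition above) =====
theorem calculate_rewards_spec : Claim_equal_calculate_rewards := by
  intro grades _
  unfold Spec_calculate_rewards
  rw [pv_calc_eq_ref, pv_alt_eq_ref]
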